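-- pv_equiv track=rewrite | github.com/twu31/Python-Machine-Problems | Recursion.py | number_ties
-- ===== SOURCE A (Python) =====
-- def number_ties(blocks, for_votes=0, against_votes=0):
--     if not blocks and for_votes==against_votes:
--         return 1
--     elif not blocks:
--         return 0
--     else:
--         num = blocks[0]
--         return number_ties(blocks[1:],for_votes+num,against_votes) + number_ties(blocks[1:],for_votes,against_votes+num)
-- ===== SOURCE B (Python) =====
-- def number_ties(blocks, for_votes=0, against_votes=0):
--     counts = {for_votes - against_votes: 1}
--     for num in blocks:
--         new = {}
--         for d, c in counts.items():
--             new[d + num] = new.get(d + num, 0) + c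
--             new[d - num] = new.get(d - num, 0) + c
--         counts = new
--     return counts.get(0, 0)
-- ===== Notes on version B (the rewrite author's own statement) =====
-- stated objective: faster
-- what changed: Replaced the exponential branching recursion over both sign choices with an iterative DP that maintains a dict mapping each reachable vote difference to the number of sign assignments producing it, answering with the count at difference 0.
import Mathlib
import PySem

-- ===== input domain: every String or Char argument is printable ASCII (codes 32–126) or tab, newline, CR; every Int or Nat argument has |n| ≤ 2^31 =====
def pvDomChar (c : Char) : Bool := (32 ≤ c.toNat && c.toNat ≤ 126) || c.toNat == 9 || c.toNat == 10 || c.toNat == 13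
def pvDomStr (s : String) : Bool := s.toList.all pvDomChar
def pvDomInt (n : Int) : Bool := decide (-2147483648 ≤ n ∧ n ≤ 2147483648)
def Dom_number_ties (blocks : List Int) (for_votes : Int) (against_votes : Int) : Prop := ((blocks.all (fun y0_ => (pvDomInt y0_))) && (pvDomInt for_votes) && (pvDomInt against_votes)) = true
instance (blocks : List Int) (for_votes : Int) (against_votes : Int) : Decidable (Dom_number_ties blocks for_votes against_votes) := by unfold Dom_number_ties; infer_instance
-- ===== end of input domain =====

-- B replaces A's exponential two-way recursion by an iterative dict-based DP over
-- reachable vote differences (objective: faster).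

-- ===== PORT A =====
def number_ties (blocks : List Int) (for_votes : Int) (against_votes : Int) : Int :=
  match blocks with
  | [] => if for_votes == against_votes then 1 else 0
  | num :: rest =>
      number_ties rest (for_votes + num) against_votes
        + number_ties rest for_votes (against_votes + num)

-- ===== PORT B =====
-- inner loop body of Source B: credit count p.2 to keys p.1+num and p.1-num of `new`
def ntInner (num : Int) (new : PySem.Dict Int Int) (p : Int × Int) : PySem.Dict Int Int :=
  let n1 := new.insert (p.1 + num) (new.getD (p.1 + num) 0 + p.2)
  n1.insert (p.1 - num) (n1.getD (p.1 - num) 0 + p.2)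

-- one block of Source B's outer loop: rebuild the difference→count dict
def ntStep (counts : PySem.Dict Int Int) (num : Int) : PySem.Dict Int Int :=
  counts.items.foldl (ntInner num) PySem.Dict.empty

def number_ties_alt (blocks : List Int) (for_votes : Int) (against_votes : Int) : Int :=
  ((blocks.foldl ntStep
      ((PySem.Dict.empty : PySem.Dict Int Int).insert (for_votes - against_votes) 1))).getD 0 0

-- ===== PRECONDITION & SPEC =====
def Spec_number_ties (blocks : List Int) (for_votes : Int) (against_votes : Int) (out : Int) : Prop := out = number_ties_alt blocks for_votes against_votes
instance (blocks : List Int) (for_votes : Int) (against_votes : Int) (out : Int) : Decidable (Spec_number_ties blocks for_votes against_votes out) := by unfold Spec_number_ties; infer_instance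

-- ===== CLAIM (what is proved, stated in full; the proofs are below) =====
def Claim_equal_number_ties : Prop := ∀ (blocks : List Int) (for_votes : Int) (against_votes : Int), Dom_number_ties blocks for_votes against_votes → Spec_number_ties blocks for_votes against_votes (number_ties blocks for_votes against_votes)

-- ===== LEMMAS AND PROOFS =====

-- A's result depends only on the difference of the two accumulators
theorem nt_shift (bs : List Int) : ∀ (f a c : Int),
    number_ties bs (f + c) (a + c) = number_ties bs f a := by
  induction bs with
  | nil =>
      intro f a c
      simp only [number_ties]
      by_cases h : f = a
      · simp [h]
      · have h1 : (f + c == a + c) = false := by simp; omega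
        have h2 : (f == a) = false := by simp [h]
        rw [h1, h2]
  | cons x bs ih =>
      intro f a c
      simp only [number_ties]
      rw [show f + c + x = (f + x) + c by ring, ih (f + x) a c,
          show a + c + x = (a + x) + c by ring, ih f (a + x) c]

theorem nt_diff (bs : List Int) (f a : Int) :
    number_ties bs f a = number_ties bs (f - a) 0 := by
  have h := nt_shift bs (f - a) 0 a
  rw [show f - a + a = f by ring, zero_add] at h
  exact h

-- weighted sum of an assoc list under A's count function for the remaining blocks
def ntWsum (bs : List Int) (l : List (Int × Int)) : Int :=
  (l.map (fun p => p.2 * number_ties bs p.1 0)).sum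

theorem ntWsum_append (bs : List Int) (l₁ l₂ : List (Int × Int)) :
    ntWsum bs (l₁ ++ l₂) = ntWsum bs l₁ + ntWsum bs l₂ := by
  simp [ntWsum]

-- updating an assoc list at a present key adds c·N(k) to the weighted sum
theorem ntWsum_map_update (bs : List Int) (l : List (Int × Int)) (k v c : Int)
    (hnd : (l.map Prod.fst).Nodup) (hmem : (k, v) ∈ l) :
    ntWsum bs (l.map (fun p => if p.1 == k then (k, v + c) else p))
      = ntWsum bs l + c * number_ties bs k 0 := by
  induction l with
  | nil => simp at hmem
  | cons p l ih =>
      simp only [List.map_cons, List.nodup_cons] at hnd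
      by_cases hk : p.1 = k
      · have hv : p = (k, v) := by
          rcases List.mem_cons.mp hmem with h | h
          · exact h.symm
          · exact absurd (List.mem_map.mpr ⟨(k, v), h, rfl⟩) (hk ▸ hnd.1)
        subst hv
        have htail : (l.map (fun p => if p.1 == k then (k, v + c) else p)) = l := by
          have h1 : (l.map (fun p => if p.1 == k then (k, v + c) else p)) = l.map id := by
            apply List.map_congr_left
            intro q hq
            have hq1 : (q.1 == k) = false := by
              simp only [beq_eq_false_iff_ne, ne_eq]
              intro h
              exact hnd.1 (h ▸ List.mem_map.mpr ⟨q, hq, rfl⟩)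
            simp [hq1]
          simpa using h1
        simp only [List.map_cons, htail]
        simp only [beq_self_eq_true, if_pos]
        simp only [ntWsum, List.map_cons, List.sum_cons]
        ring
      · have hm : (k, v) ∈ l := by
          rcases List.mem_cons.mp hmem with h | h
          · exact absurd (congrArg Prod.fst h).symm hk
          · exact h
        have hih := ih hnd.2 hm
        have hne : (p.1 == k) = false := by simp [hk]
        simp only [List.map_cons, hne, if_neg, Bool.false_eq_true, not_false_iff]
        simp only [ntWsum, List.map_cons, List.sum_cons] at hih ⊢
        omega

-- adding c at key k to a nodup-keyed dict adds c·N(k) to the weighted sum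
theorem ntWsum_insert_add (bs : List Int) (d : PySem.Dict Int Int) (k c : Int)
    (hnd : d.keys.Nodup) :
    ntWsum bs (d.insert k (d.getD k 0 + c)).items
      = ntWsum bs d.items + c * number_ties bs k 0 := by
  by_cases hc : d.contains k = true
  · obtain ⟨v, hv⟩ : ∃ v, d.get? k = some v := by
      have h := PySem.Dict.contains_eq_isSome_get? (d := d) (k := k)
      rw [hc] at h
      exact Option.isSome_iff_exists.mp h.symm
    have hgd : d.getD k 0 = v := PySem.Dict.getD_of_get?_eq_some d 0 hv
    have hmem : (k, v) ∈ d.items := PySem.Dict.mem_items_of_get?_eq_some d hv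
    rw [PySem.Dict.items_insert_of_contains d _ hc, hgd]
    exact ntWsum_map_update bs d.items k v c hnd hmem
  · have hc' : d.contains k = false := by simpa using hc
    rw [PySem.Dict.items_insert_of_not_contains d _ hc',
        PySem.Dict.getD_of_not_contains d 0 hc', ntWsum_append]
    simp [ntWsum]

-- the inner fold distributes c over both sign choices
theorem ntWsum_inner_fold (bs : List Int) (b : Int) (l : List (Int × Int)) :
    ∀ (new : PySem.Dict Int Int), new.keys.Nodup →
    ntWsum bs (l.foldl (ntInner b) new).items
      = ntWsum bs new.items
        + (l.map (fun p => p.2 * (number_ties bs (p.1 + b) 0 + number_ties bs (p.1 - b) 0))).sum := by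
  induction l with
  | nil => intro new _; simp
  | cons p l ih =>
      intro new hnd
      simp only [List.foldl_cons]
      have hnd1 : ((new.insert (p.1 + b) (new.getD (p.1 + b) 0 + p.2)).insert (p.1 - b)
          (((new.insert (p.1 + b) (new.getD (p.1 + b) 0 + p.2))).getD (p.1 - b) 0 + p.2)).keys.Nodup :=
        PySem.Dict.nodup_keys_insert _ _ _ (PySem.Dict.nodup_keys_insert _ _ _ hnd)
      rw [ih _ (by simpa [ntInner] using hnd1)]
      simp only [ntInner]
      rw [ntWsum_insert_add bs _ (p.1 - b) p.2 (PySem.Dict.nodup_keys_insert _ _ _ hnd),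
          ntWsum_insert_add bs new (p.1 + b) p.2 hnd]
      simp only [List.map_cons, List.sum_cons]
      ring

-- keys stay nodup through the inner fold
theorem ntInner_fold_nodup (b : Int) (l : List (Int × Int)) :
    ∀ (new : PySem.Dict Int Int), new.keys.Nodup →
    ((l.foldl (ntInner b) new)).keys.Nodup := by
  induction l with
  | nil => intro new h; simpa
  | cons p l ih =>
      intro new hnd
      simp only [List.foldl_cons]
      exact ih _ (by
        simp only [ntInner]
        exact PySem.Dict.nodup_keys_insert _ _ _ (PySem.Dict.nodup_keys_insert _ _ _ hnd))

-- at the end, looking up 0 reads off the weighted sum for no remaining blocks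
theorem getD_zero_eq_ntWsum (l : List (Int × Int)) (hnd : (l.map Prod.fst).Nodup) :
    (PySem.Dict.mk l).getD 0 0 = ntWsum [] l := by
  induction l with
  | nil =>
      show (PySem.Dict.empty : PySem.Dict Int Int).getD 0 0 = ntWsum [] []
      simp [ntWsum, PySem.Dict.getD_empty]
  | cons p l ih =>
      simp only [List.map_cons, List.nodup_cons] at hnd
      rw [PySem.Dict.getD_eq_get?_getD, PySem.Dict.get?_mk_cons]
      by_cases h0 : p.1 = 0
      · have hz : (l.map (fun q => q.2 * number_ties [] q.1 0)).sum = 0 := by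
          apply List.sum_eq_zero
          intro x hx
          obtain ⟨q, hq, rfl⟩ := List.mem_map.mp hx
          have hq0 : (q.1 == (0 : Int)) = false := by
            simp only [beq_eq_false_iff_ne, ne_eq]
            intro h
            exact hnd.1 (h0 ▸ h ▸ List.mem_map.mpr ⟨q, hq, rfl⟩)
          simp [number_ties, hq0]
        have hp0 : (p.1 == (0 : Int)) = true := by simp [h0]
        rw [if_pos hp0]
        simp only [Option.getD_some, ntWsum, List.map_cons, List.sum_cons, hz, add_zero]
        simp [number_ties, h0]
      · have hne : (p.1 == 0) = false := by simp [h0]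
        rw [hne]
        simp only [Bool.false_eq_true, if_neg, not_false_iff]
        rw [← PySem.Dict.getD_eq_get?_getD, ih hnd.2]
        simp only [ntWsum, List.map_cons, List.sum_cons, number_ties]
        simp [h0]

-- main invariant: folding the remaining blocks and reading key 0 computes the weighted sum
theorem nt_main (bs : List Int) :
    ∀ (d : PySem.Dict Int Int), d.keys.Nodup →
    (bs.foldl ntStep d).getD 0 0 = ntWsum bs d.items := by
  induction bs with
  | nil =>
      intro d hnd
      simpa using getD_zero_eq_ntWsum d.items hnd
  | cons b bs ih =>
      intro d hnd
      simp only [List.foldl_cons]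
      rw [ih (ntStep d b)
          (ntInner_fold_nodup b d.items PySem.Dict.empty PySem.Dict.nodup_keys_empty)]
      show ntWsum bs (d.items.foldl (ntInner b) PySem.Dict.empty).items = _
      rw [ntWsum_inner_fold bs b d.items PySem.Dict.empty PySem.Dict.nodup_keys_empty]
      have : ntWsum bs (PySem.Dict.empty : PySem.Dict Int Int).items = 0 := by
        simp [ntWsum, PySem.Dict.empty]
      rw [this, zero_add]
      simp only [ntWsum, number_ties]
      apply congrArg
      apply List.map_congr_left
      intro p _
      rw [nt_diff bs p.1 (0 + b)]
      ring_nf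

-- ===== VERDICT (by name: the statement is the Claim_ definition above) =====
theorem number_ties_spec : Claim_equal_number_ties := by
  intro blocks f a _
  show number_ties blocks f a = number_ties_alt blocks f a
  unfold number_ties_alt
  rw [nt_main blocks _ (PySem.Dict.nodup_keys_insert _ _ _ PySem.Dict.nodup_keys_empty)]
  rw [PySem.Dict.items_insert_of_not_contains (PySem.Dict.empty : PySem.Dict Int Int) 1
      (PySem.Dict.contains_empty _)]
  have hit : ((PySem.Dict.empty : PySem.Dict Int Int)).items = [] := rfl
  rw [hit]
  simp only [List.nil_append, ntWsum, List.map_cons, List.map_nil, List.sum_cons, List.sum_nil]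
  rw [nt_diff blocks f a]
  ring
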